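-- pv_equiv track=rewrite | github.com/codepod-sandbox/numpy-rust | python/numpy/_scalar_types.py | _scalar_promote
-- ===== SOURCE A (Python) =====
-- def _scalar_promote(dn1, dn2):
--     """Promote two dtype names and return the result dtype name string."""
--     # Inlined fast promotion table to avoid constructing dtype objects.
--     _PROMOTE = {
--         # same type -> same type
--     }
--     key = (dn1, dn2)
--     # Fast path: same dtype (except bool+bool which promotes to int8 for arithmetic)
--     if dn1 == dn2:
--         if dn1 == 'bool':
--             return 'int8'
--         return dn1
--
--     # Integer promotion tables (manual for speed)
--     _INT_RANK = {
--         'bool': 0, 'int8': 1, 'uint8': 2, 'int16': 3, 'uint16': 4,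
--         'int32': 5, 'uint32': 6, 'int64': 7, 'uint64': 8,
--     }
--     _FLOAT_RANK = {'float16': 0, 'float32': 1, 'float64': 2}
--     _COMPLEX_RANK = {'complex64': 0, 'complex128': 1}
--
--     # Both integers
--     if dn1 in _INT_RANK and dn2 in _INT_RANK:
--         # NumPy: bool + bool -> int8 (not bool) for arithmetic
--         if dn1 == 'bool' and dn2 == 'bool':
--             return 'int8'
--         if dn1 == 'bool':
--             return dn2
--         if dn2 == 'bool':
--             return dn1
--         a_signed = not dn1.startswith('uint')
--         b_signed = not dn2.startswith('uint')
--         _bits = {'int8': 8, 'uint8': 8, 'int16': 16, 'uint16': 16,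
--                  'int32': 32, 'uint32': 32, 'int64': 64, 'uint64': 64}
--         ab = _bits[dn1]
--         bb = _bits[dn2]
--         bmax = ab if ab > bb else bb
--         if a_signed == b_signed:
--             _names = {8: 'int8', 16: 'int16', 32: 'int32', 64: 'int64'} if a_signed else \
--                      {8: 'uint8', 16: 'uint16', 32: 'uint32', 64: 'uint64'}
--             return _names[bmax]
--         # signed/unsigned mix
--         sbits = ab if a_signed else bb
--         ubits = ab if not a_signed else bb
--         if sbits > ubits:
--             return {8: 'int8', 16: 'int16', 32: 'int32', 64: 'int64'}[sbits]
--         for b in (8, 16, 32, 64):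
--             if b > ubits:
--                 return {8: 'int8', 16: 'int16', 32: 'int32', 64: 'int64'}[b]
--         return 'float64'
--
--     # Both floats
--     if dn1 in _FLOAT_RANK and dn2 in _FLOAT_RANK:
--         return dn1 if _FLOAT_RANK[dn1] >= _FLOAT_RANK[dn2] else dn2
--
--     # Both complex
--     if dn1 in _COMPLEX_RANK and dn2 in _COMPLEX_RANK:
--         return dn1 if _COMPLEX_RANK[dn1] >= _COMPLEX_RANK[dn2] else dn2
--
--     # Complex + anything -> complex
--     if dn1 in _COMPLEX_RANK or dn2 in _COMPLEX_RANK: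
--         def _real_bits(d):
--             if d in _COMPLEX_RANK:
--                 return 32 if d == 'complex64' else 64
--             if d in _FLOAT_RANK:
--                 return {'float16': 16, 'float32': 32, 'float64': 64}[d]
--             # Integers: map to the float precision needed
--             _int_to_float = {'bool': 16, 'int8': 16, 'uint8': 16,
--                              'int16': 16, 'uint16': 16,
--                              'int32': 64, 'uint32': 64,
--                              'int64': 64, 'uint64': 64}
--             return _int_to_float.get(d, 64)
--         rb = _real_bits(dn1)
--         rc = _real_bits(dn2)
--         m = rb if rb > rc else rc
--         return 'complex64' if m <= 32 else 'complex128'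
--
--     # Float + int -> float (at least float32)
--     if dn1 in _FLOAT_RANK or dn2 in _FLOAT_RANK:
--         fd = dn1 if dn1 in _FLOAT_RANK else dn2
--         other = dn2 if dn1 in _FLOAT_RANK else dn1
--         fb = {'float16': 16, 'float32': 32, 'float64': 64}[fd]
--         if other in _INT_RANK:
--             ob = {'bool': 1, 'int8': 8, 'uint8': 8, 'int16': 16, 'uint16': 16,
--                   'int32': 32, 'uint32': 32, 'int64': 64, 'uint64': 64}[other]
--             if fb == 16:
--                 return 'float16' if ob <= 8 else 'float32'
--             if fb == 32:
--                 return 'float64' if ob >= 32 else 'float32'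
--             return 'float64'
--         return fd
--
--     return 'float64'
-- ===== SOURCE B (Python) =====
-- # B: precomputed nested promotion table + one lookup, replacing A's branch cascade (table built once at module level).
-- _PROMOTE_TABLE = {
--     'bool': {'int8': 'int8', 'uint8': 'uint8', 'int16': 'int16', 'uint16': 'uint16', 'int32': 'int32', 'uint32': 'uint32', 'int64': 'int64', 'uint64': 'uint64', 'float16': 'float16', 'float32': 'float32', 'float64': 'float64', 'complex64': 'complex64', 'complex128': 'complex128'},
--     'int8': {'bool': 'int8', 'uint8': 'int16', 'int16': 'int16', 'uint16': 'int32', 'int32': 'int32', 'uint32': 'int64', 'int64': 'int64', 'uint64': 'float64', 'float16': 'float16', 'float32': 'float32', 'float64': 'float64', 'complex64': 'complex64', 'complex128': 'complex128'},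
--     'uint8': {'bool': 'uint8', 'int8': 'int16', 'int16': 'int16', 'uint16': 'uint16', 'int32': 'int32', 'uint32': 'uint32', 'int64': 'int64', 'uint64': 'uint64', 'float16': 'float16', 'float32': 'float32', 'float64': 'float64', 'complex64': 'complex64', 'complex128': 'complex128'},
--     'int16': {'bool': 'int16', 'int8': 'int16', 'uint8': 'int16', 'uint16': 'int32', 'int32': 'int32', 'uint32': 'int64', 'int64': 'int64', 'uint64': 'float64', 'float16': 'float32', 'float32': 'float32', 'float64': 'float64', 'complex64': 'complex64', 'complex128': 'complex128'},
--     'uint16': {'bool': 'uint16', 'int8': 'int32', 'uint8': 'uint16', 'int16': 'int32', 'int32': 'int32', 'uint32': 'uint32', 'int64': 'int64', 'uint64': 'uint64', 'float16': 'float32', 'float32': 'float32', 'float64': 'float64', 'complex64': 'complex64', 'complex128': 'complex128'},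
--     'int32': {'bool': 'int32', 'int8': 'int32', 'uint8': 'int32', 'int16': 'int32', 'uint16': 'int32', 'uint32': 'int64', 'int64': 'int64', 'uint64': 'float64', 'float16': 'float32', 'float32': 'float64', 'float64': 'float64', 'complex64': 'complex128', 'complex128': 'complex128'},
--     'uint32': {'bool': 'uint32', 'int8': 'int64', 'uint8': 'uint32', 'int16': 'int64', 'uint16': 'uint32', 'int32': 'int64', 'int64': 'int64', 'uint64': 'uint64', 'float16': 'float32', 'float32': 'float64', 'float64': 'float64', 'complex64': 'complex128', 'complex128': 'complex128'},
--     'int64': {'bool': 'int64', 'int8': 'int64', 'uint8': 'int64', 'int16': 'int64', 'uint16': 'int64', 'int32': 'int64', 'uint32': 'int64', 'uint64': 'float64', 'float16': 'float32', 'float32': 'float64', 'float64': 'float64', 'complex64': 'complex128', 'complex128': 'complex128'},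
--     'uint64': {'bool': 'uint64', 'int8': 'float64', 'uint8': 'uint64', 'int16': 'float64', 'uint16': 'uint64', 'int32': 'float64', 'uint32': 'uint64', 'int64': 'float64', 'float16': 'float32', 'float32': 'float64', 'float64': 'float64', 'complex64': 'complex128', 'complex128': 'complex128'},
--     'float16': {'bool': 'float16', 'int8': 'float16', 'uint8': 'float16', 'int16': 'float32', 'uint16': 'float32', 'int32': 'float32', 'uint32': 'float32', 'int64': 'float32', 'uint64': 'float32', 'float32': 'float32', 'float64': 'float64', 'complex64': 'complex64', 'complex128': 'complex128'},
--     'float32': {'bool': 'float32', 'int8': 'float32', 'uint8': 'float32', 'int16': 'float32', 'uint16': 'float32', 'int32': 'float64', 'uint32': 'float64', 'int64': 'float64', 'uint64': 'float64', 'float16': 'float32', 'float64': 'float64', 'complex64': 'complex64', 'complex128': 'complex128'},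
--     'float64': {'bool': 'float64', 'int8': 'float64', 'uint8': 'float64', 'int16': 'float64', 'uint16': 'float64', 'int32': 'float64', 'uint32': 'float64', 'int64': 'float64', 'uint64': 'float64', 'float16': 'float64', 'float32': 'float64', 'complex64': 'complex128', 'complex128': 'complex128'},
--     'complex64': {'bool': 'complex64', 'int8': 'complex64', 'uint8': 'complex64', 'int16': 'complex64', 'uint16': 'complex64', 'int32': 'complex128', 'uint32': 'complex128', 'int64': 'complex128', 'uint64': 'complex128', 'float16': 'complex64', 'float32': 'complex64', 'float64': 'complex128', 'complex128': 'complex128'},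
--     'complex128': {'bool': 'complex128', 'int8': 'complex128', 'uint8': 'complex128', 'int16': 'complex128', 'uint16': 'complex128', 'int32': 'complex128', 'uint32': 'complex128', 'int64': 'complex128', 'uint64': 'complex128', 'float16': 'complex128', 'float32': 'complex128', 'float64': 'complex128', 'complex64': 'complex128'},
-- }
-- _FLOATS = ('float16', 'float32', 'float64')
-- _COMPLEXES = ('complex64', 'complex128')
--
--
-- def _scalar_promote(dn1, dn2):
--     """Promote two dtype names and return the result dtype name string."""
--     if dn1 == dn2:
--         return 'int8' if dn1 == 'bool' else dn1
--     r = _PROMOTE_TABLE.get(dn1, {}).get(dn2)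
--     if r is not None:
--         return r
--     # at least one name is not a known dtype
--     if dn1 in _COMPLEXES or dn2 in _COMPLEXES:
--         return 'complex128'
--     if dn1 in _FLOATS:
--         return dn1
--     if dn2 in _FLOATS:
--         return dn2
--     return 'float64'
-- ===== Notes on version B (the rewrite author's own statement) =====
-- stated objective: alternative
-- what changed: Replaces A's cascade of rank/bit arithmetic branches (with per-call dict construction) by a single precomputed nested pair->result promotion table built once at module level, plus a small fallback for unknown names.
import Mathlib
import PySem

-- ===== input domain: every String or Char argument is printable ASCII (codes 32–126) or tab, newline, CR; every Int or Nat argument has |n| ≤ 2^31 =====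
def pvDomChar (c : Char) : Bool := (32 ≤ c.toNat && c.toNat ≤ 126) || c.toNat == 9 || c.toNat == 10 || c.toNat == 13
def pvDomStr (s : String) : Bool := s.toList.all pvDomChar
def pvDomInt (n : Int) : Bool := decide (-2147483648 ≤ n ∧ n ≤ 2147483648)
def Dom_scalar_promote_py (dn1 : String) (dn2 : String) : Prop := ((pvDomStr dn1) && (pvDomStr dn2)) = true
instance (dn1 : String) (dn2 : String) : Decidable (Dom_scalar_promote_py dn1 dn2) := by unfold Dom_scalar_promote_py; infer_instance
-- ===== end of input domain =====

-- B replaces A's branch cascade by a precomputed pair->result table built once, plus one lookup (objective: alternative).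

-- ===== PORT A =====
-- A constructs these dict literals on every call; their values are constants, ported as top-level helpers.
def pA_INT_RANK : PySem.Dict String Int := PySem.Dict.mk
  [("bool", 0), ("int8", 1), ("uint8", 2), ("int16", 3), ("uint16", 4),
   ("int32", 5), ("uint32", 6), ("int64", 7), ("uint64", 8)]
def pA_FLOAT_RANK : PySem.Dict String Int := PySem.Dict.mk
  [("float16", 0), ("float32", 1), ("float64", 2)]
def pA_COMPLEX_RANK : PySem.Dict String Int := PySem.Dict.mk
  [("complex64", 0), ("complex128", 1)]
def pA_BITS : PySem.Dict String Int := PySem.Dict.mk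
  [("int8", 8), ("uint8", 8), ("int16", 16), ("uint16", 16),
   ("int32", 32), ("uint32", 32), ("int64", 64), ("uint64", 64)]
def pA_SNAMES : PySem.Dict Int String := PySem.Dict.mk
  [(8, "int8"), (16, "int16"), (32, "int32"), (64, "int64")]
def pA_UNAMES : PySem.Dict Int String := PySem.Dict.mk
  [(8, "uint8"), (16, "uint16"), (32, "uint32"), (64, "uint64")]
def pA_FBITS : PySem.Dict String Int := PySem.Dict.mk
  [("float16", 16), ("float32", 32), ("float64", 64)]
def pA_INT_TO_FLOAT : PySem.Dict String Int := PySem.Dict.mk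
  [("bool", 16), ("int8", 16), ("uint8", 16), ("int16", 16), ("uint16", 16),
   ("int32", 64), ("uint32", 64), ("int64", 64), ("uint64", 64)]
def pA_OBITS : PySem.Dict String Int := PySem.Dict.mk
  [("bool", 1), ("int8", 8), ("uint8", 8), ("int16", 16), ("uint16", 16),
   ("int32", 32), ("uint32", 32), ("int64", 64), ("uint64", 64)]

-- the inner 'def _real_bits(d)' of A (closes only over the constant tables)
def pA_realBits (d : String) : Int :=
  if pA_COMPLEX_RANK.contains d then (if d == "complex64" then 32 else 64)
  else if pA_FLOAT_RANK.contains d then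
    (PySem.Dict.mk [("float16", (16:Int)), ("float32", 32), ("float64", 64)]).getD d 0
  else pA_INT_TO_FLOAT.getD d 64

-- 'for b in (8,16,32,64): if b > ubits: return names[b]' + trailing 'return float64'
def pA_firstLarger (ubits : Int) : String :=
  match List.find? (fun b => b > ubits) [(8:Int), 16, 32, 64] with
  | some b => pA_SNAMES.getD b ""   -- the Python indexes _names[b]; b is always a key here
  | none => "float64"

def scalar_promote_py (dn1 : String) (dn2 : String) : String :=
  if dn1 == dn2 then (if dn1 == "bool" then "int8" else dn1)
  else if pA_INT_RANK.contains dn1 && pA_INT_RANK.contains dn2 then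
    if dn1 == "bool" && dn2 == "bool" then "int8"
    else if dn1 == "bool" then dn2
    else if dn2 == "bool" then dn1
    else
      let aSigned := !(PySem.Str.startswith dn1 "uint")
      let bSigned := !(PySem.Str.startswith dn2 "uint")
      let ab := pA_BITS.getD dn1 0       -- '_bits[dn1]': key always present on this path
      let bb := pA_BITS.getD dn2 0
      let bmax := if ab > bb then ab else bb
      if aSigned == bSigned then
        (if aSigned then pA_SNAMES else pA_UNAMES).getD bmax ""   -- '_names[bmax]': key always present
      else
        let sbits := if aSigned then ab else bb
        let ubits := if !aSigned then ab else bb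
        if sbits > ubits then pA_SNAMES.getD sbits ""
        else pA_firstLarger ubits
  else if pA_FLOAT_RANK.contains dn1 && pA_FLOAT_RANK.contains dn2 then
    if pA_FLOAT_RANK.getD dn1 0 ≥ pA_FLOAT_RANK.getD dn2 0 then dn1 else dn2
  else if pA_COMPLEX_RANK.contains dn1 && pA_COMPLEX_RANK.contains dn2 then
    if pA_COMPLEX_RANK.getD dn1 0 ≥ pA_COMPLEX_RANK.getD dn2 0 then dn1 else dn2
  else if pA_COMPLEX_RANK.contains dn1 || pA_COMPLEX_RANK.contains dn2 then
    let rb := pA_realBits dn1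
    let rc := pA_realBits dn2
    let m := if rb > rc then rb else rc
    if m ≤ 32 then "complex64" else "complex128"
  else if pA_FLOAT_RANK.contains dn1 || pA_FLOAT_RANK.contains dn2 then
    let fd := if pA_FLOAT_RANK.contains dn1 then dn1 else dn2
    let other := if pA_FLOAT_RANK.contains dn1 then dn2 else dn1
    let fb := pA_FBITS.getD fd 0        -- key always present on this path
    if pA_INT_RANK.contains other then
      let ob := pA_OBITS.getD other 0   -- key always present on this path
      if fb == 16 then (if ob ≤ 8 then "float16" else "float32")
      else if fb == 32 then (if ob ≥ 32 then "float64" else "float32")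
      else "float64"
    else fd
  else "float64"

-- ===== PORT B =====
def pB_TABLE : PySem.Dict String (PySem.Dict String String) := PySem.Dict.mk [
  ("bool", PySem.Dict.mk [("int8", "int8"), ("uint8", "uint8"), ("int16", "int16"), ("uint16", "uint16"), ("int32", "int32"), ("uint32", "uint32"), ("int64", "int64"), ("uint64", "uint64"), ("float16", "float16"), ("float32", "float32"), ("float64", "float64"), ("complex64", "complex64"), ("complex128", "complex128")]),
  ("int8", PySem.Dict.mk [("bool", "int8"), ("uint8", "int16"), ("int16", "int16"), ("uint16", "int32"), ("int32", "int32"), ("uint32", "int64"), ("int64", "int64"), ("uint64", "float64"), ("float16", "float16"), ("float32", "float32"), ("float64", "float64"), ("complex64", "complex64"), ("complex128", "complex128")]),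
  ("uint8", PySem.Dict.mk [("bool", "uint8"), ("int8", "int16"), ("int16", "int16"), ("uint16", "uint16"), ("int32", "int32"), ("uint32", "uint32"), ("int64", "int64"), ("uint64", "uint64"), ("float16", "float16"), ("float32", "float32"), ("float64", "float64"), ("complex64", "complex64"), ("complex128", "complex128")]),
  ("int16", PySem.Dict.mk [("bool", "int16"), ("int8", "int16"), ("uint8", "int16"), ("uint16", "int32"), ("int32", "int32"), ("uint32", "int64"), ("int64", "int64"), ("uint64", "float64"), ("float16", "float32"), ("float32", "float32"), ("float64", "float64"), ("complex64", "complex64"), ("complex128", "complex128")]),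
  ("uint16", PySem.Dict.mk [("bool", "uint16"), ("int8", "int32"), ("uint8", "uint16"), ("int16", "int32"), ("int32", "int32"), ("uint32", "uint32"), ("int64", "int64"), ("uint64", "uint64"), ("float16", "float32"), ("float32", "float32"), ("float64", "float64"), ("complex64", "complex64"), ("complex128", "complex128")]),
  ("int32", PySem.Dict.mk [("bool", "int32"), ("int8", "int32"), ("uint8", "int32"), ("int16", "int32"), ("uint16", "int32"), ("uint32", "int64"), ("int64", "int64"), ("uint64", "float64"), ("float16", "float32"), ("float32", "float64"), ("float64", "float64"), ("complex64", "complex128"), ("complex128", "complex128")]),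
  ("uint32", PySem.Dict.mk [("bool", "uint32"), ("int8", "int64"), ("uint8", "uint32"), ("int16", "int64"), ("uint16", "uint32"), ("int32", "int64"), ("int64", "int64"), ("uint64", "uint64"), ("float16", "float32"), ("float32", "float64"), ("float64", "float64"), ("complex64", "complex128"), ("complex128", "complex128")]),
  ("int64", PySem.Dict.mk [("bool", "int64"), ("int8", "int64"), ("uint8", "int64"), ("int16", "int64"), ("uint16", "int64"), ("int32", "int64"), ("uint32", "int64"), ("uint64", "float64"), ("float16", "float32"), ("float32", "float64"), ("float64", "float64"), ("complex64", "complex128"), ("complex128", "complex128")]),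
  ("uint64", PySem.Dict.mk [("bool", "uint64"), ("int8", "float64"), ("uint8", "uint64"), ("int16", "float64"), ("uint16", "uint64"), ("int32", "float64"), ("uint32", "uint64"), ("int64", "float64"), ("float16", "float32"), ("float32", "float64"), ("float64", "float64"), ("complex64", "complex128"), ("complex128", "complex128")]),
  ("float16", PySem.Dict.mk [("bool", "float16"), ("int8", "float16"), ("uint8", "float16"), ("int16", "float32"), ("uint16", "float32"), ("int32", "float32"), ("uint32", "float32"), ("int64", "float32"), ("uint64", "float32"), ("float32", "float32"), ("float64", "float64"), ("complex64", "complex64"), ("complex128", "complex128")]),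
  ("float32", PySem.Dict.mk [("bool", "float32"), ("int8", "float32"), ("uint8", "float32"), ("int16", "float32"), ("uint16", "float32"), ("int32", "float64"), ("uint32", "float64"), ("int64", "float64"), ("uint64", "float64"), ("float16", "float32"), ("float64", "float64"), ("complex64", "complex64"), ("complex128", "complex128")]),
  ("float64", PySem.Dict.mk [("bool", "float64"), ("int8", "float64"), ("uint8", "float64"), ("int16", "float64"), ("uint16", "float64"), ("int32", "float64"), ("uint32", "float64"), ("int64", "float64"), ("uint64", "float64"), ("float16", "float64"), ("float32", "float64"), ("complex64", "complex128"), ("complex128", "complex128")]),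
  ("complex64", PySem.Dict.mk [("bool", "complex64"), ("int8", "complex64"), ("uint8", "complex64"), ("int16", "complex64"), ("uint16", "complex64"), ("int32", "complex128"), ("uint32", "complex128"), ("int64", "complex128"), ("uint64", "complex128"), ("float16", "complex64"), ("float32", "complex64"), ("float64", "complex128"), ("complex128", "complex128")]),
  ("complex128", PySem.Dict.mk [("bool", "complex128"), ("int8", "complex128"), ("uint8", "complex128"), ("int16", "complex128"), ("uint16", "complex128"), ("int32", "complex128"), ("uint32", "complex128"), ("int64", "complex128"), ("uint64", "complex128"), ("float16", "complex128"), ("float32", "complex128"), ("float64", "complex128"), ("complex64", "complex128")]),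
]
def pB_FLOATS : List String := ["float16", "float32", "float64"]
def pB_COMPLEXES : List String := ["complex64", "complex128"]

def scalar_promote_py_alt (dn1 : String) (dn2 : String) : String :=
  if dn1 == dn2 then (if dn1 == "bool" then "int8" else dn1)
  else
    match (pB_TABLE.getD dn1 PySem.Dict.empty).get? dn2 with
    | some r => r
    | none =>
      -- at least one name is not a known dtype
      if pB_COMPLEXES.contains dn1 || pB_COMPLEXES.contains dn2 then "complex128"
      else if pB_FLOATS.contains dn1 then dn1
      else if pB_FLOATS.contains dn2 then dn2
      else "float64"

-- ===== PRECONDITION & SPEC =====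
def Spec_scalar_promote_py (dn1 : String) (dn2 : String) (out : String) : Prop := out = scalar_promote_py_alt dn1 dn2
instance (dn1 : String) (dn2 : String) (out : String) : Decidable (Spec_scalar_promote_py dn1 dn2 out) := by unfold Spec_scalar_promote_py; infer_instance

-- ===== CLAIM (what is proved, stated in full; the proofs are below) =====
def Claim_equal_scalar_promote_py : Prop := ∀ (dn1 : String) (dn2 : String), Dom_scalar_promote_py dn1 dn2 → Spec_scalar_promote_py dn1 dn2 (scalar_promote_py dn1 dn2)

-- ===== LEMMAS AND PROOFS =====
def pvKnown : List String :=
  ["bool", "int8", "uint8", "int16", "uint16", "int32", "uint32", "int64", "uint64",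
   "float16", "float32", "float64", "complex64", "complex128"]

theorem pv_main : ∀ (dn1 dn2 : String), scalar_promote_py dn1 dn2 = scalar_promote_py_alt dn1 dn2 := by
  intro dn1 dn2
  by_cases e : dn1 = dn2
  · subst e
    simp [scalar_promote_py, scalar_promote_py_alt]
  · by_cases h1 : dn1 ∈ pvKnown
    · by_cases h2 : dn2 ∈ pvKnown
      · fin_cases h1 <;> fin_cases h2 <;> decide
      · simp only [pvKnown, List.mem_cons, List.not_mem_nil, or_false, not_or] at h2
        obtain ⟨g1,g2,g3,g4,g5,g6,g7,g8,g9,g10,g11,g12,g13,g14⟩ := h2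
        fin_cases h1 <;>
          simp [scalar_promote_py, scalar_promote_py_alt, pA_INT_RANK, pA_FLOAT_RANK,
            pA_COMPLEX_RANK, pA_realBits, pA_INT_TO_FLOAT, pB_TABLE, pB_FLOATS, pB_COMPLEXES,
            pA_FBITS, pA_OBITS, PySem.Dict.contains_mk, PySem.Dict.get?_mk_cons, PySem.Dict.getD,
            PySem.Dict.empty, PySem.Dict.get?,
            g1,g2,g3,g4,g5,g6,g7,g8,g9,g10,g11,g12,g13,g14, Ne.symm g1, Ne.symm g2, Ne.symm g3,
            Ne.symm g4, Ne.symm g5, Ne.symm g6, Ne.symm g7, Ne.symm g8, Ne.symm g9, Ne.symm g10,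
            Ne.symm g11, Ne.symm g12, Ne.symm g13, Ne.symm g14]
    · simp only [pvKnown, List.mem_cons, List.not_mem_nil, or_false, not_or] at h1
      obtain ⟨f1,f2,f3,f4,f5,f6,f7,f8,f9,f10,f11,f12,f13,f14⟩ := h1
      by_cases h2 : dn2 ∈ pvKnown
      · fin_cases h2 <;>
          simp [scalar_promote_py, scalar_promote_py_alt, pA_INT_RANK, pA_FLOAT_RANK,
            pA_COMPLEX_RANK, pA_realBits, pA_INT_TO_FLOAT, pB_TABLE, pB_FLOATS, pB_COMPLEXES,
            pA_FBITS, pA_OBITS, PySem.Dict.contains_mk, PySem.Dict.get?_mk_cons, PySem.Dict.getD,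
            PySem.Dict.empty, PySem.Dict.get?,
            f1,f2,f3,f4,f5,f6,f7,f8,f9,f10,f11,f12,f13,f14, Ne.symm f1, Ne.symm f2, Ne.symm f3,
            Ne.symm f4, Ne.symm f5, Ne.symm f6, Ne.symm f7, Ne.symm f8, Ne.symm f9, Ne.symm f10,
            Ne.symm f11, Ne.symm f12, Ne.symm f13, Ne.symm f14]
      · simp only [pvKnown, List.mem_cons, List.not_mem_nil, or_false, not_or] at h2
        obtain ⟨g1,g2,g3,g4,g5,g6,g7,g8,g9,g10,g11,g12,g13,g14⟩ := h2
        simp [scalar_promote_py, scalar_promote_py_alt, pA_INT_RANK, pA_FLOAT_RANK,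
          pA_COMPLEX_RANK, pA_realBits, pA_INT_TO_FLOAT, pB_TABLE, pB_FLOATS, pB_COMPLEXES,
          pA_FBITS, pA_OBITS, PySem.Dict.contains_mk, PySem.Dict.get?_mk_cons, PySem.Dict.getD,
          PySem.Dict.empty, PySem.Dict.get?, e,
          f1,f2,f3,f4,f5,f6,f7,f8,f9,f10,f11,f12,f13,f14, Ne.symm f1, Ne.symm f2, Ne.symm f3,
          Ne.symm f4, Ne.symm f5, Ne.symm f6, Ne.symm f7, Ne.symm f8, Ne.symm f9, Ne.symm f10,
          Ne.symm f11, Ne.symm f12, Ne.symm f13, Ne.symm f14,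
          g1,g2,g3,g4,g5,g6,g7,g8,g9,g10,g11,g12,g13,g14, Ne.symm g1, Ne.symm g2, Ne.symm g3,
          Ne.symm g4, Ne.symm g5, Ne.symm g6, Ne.symm g7, Ne.symm g8, Ne.symm g9, Ne.symm g10,
          Ne.symm g11, Ne.symm g12, Ne.symm g13, Ne.symm g14]

-- ===== VERDICT (by name: the statement is the Claim_ definition above) =====
theorem scalar_promote_py_spec : Claim_equal_scalar_promote_py := by
  intro dn1 dn2 _
  unfold Spec_scalar_promote_py
  exact pv_main dn1 dn2
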